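-- pv_equiv track=rewrite | github.com/mikedee56/sanskrit-processor-lean | utils/scripture_term_extractor.py | _categorize_term
-- ===== SOURCE A (Python) =====
-- from typing import Set, Dict, List, Tuple
--
-- def _categorize_term(term: str, contexts: List[Dict]) -> str:
--     """Categorize a Sanskrit term based on context."""
--     # Simple categorization based on common patterns
--     if any('gita' in ctx.get('source', '').lower() for ctx in contexts):
--         return 'bhagavad_gita'
--     elif any('upanishad' in ctx.get('source', '').lower() for ctx in contexts):
--         return 'upanishad'
--     elif any('yoga' in ctx.get('source', '').lower() for ctx in contexts):
--         return 'yoga_sutra'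
--     else:
--         return 'scripture'
-- ===== SOURCE B (Python) =====
-- from typing import Set, Dict, List, Tuple
--
-- def _categorize_term(term: str, contexts: List[Dict]) -> str:
--     """One pass: build presence flags for each keyword, then decide by priority."""
--     has_gita = has_upanishad = has_yoga = False
--     for ctx in contexts:
--         src = ctx.get('source', '').lower()
--         if 'gita' in src:
--             has_gita = True
--         if 'upanishad' in src:
--             has_upanishad = True
--         if 'yoga' in src:
--             has_yoga = True
--     if has_gita:
--         return 'bhagavad_gita'
--     if has_upanishad:
--         return 'upanishad'
--     if has_yoga:
--         return 'yoga_sutra'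
--     return 'scripture'
-- ===== Notes on version B (the rewrite author's own statement) =====
-- stated objective: alternative
-- what changed: B replaces A's three short-circuiting any(...) scans over contexts with a single pass that computes each source string once and collects three presence flags, deciding the category afterwards by the same priority order.
import Mathlib
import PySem

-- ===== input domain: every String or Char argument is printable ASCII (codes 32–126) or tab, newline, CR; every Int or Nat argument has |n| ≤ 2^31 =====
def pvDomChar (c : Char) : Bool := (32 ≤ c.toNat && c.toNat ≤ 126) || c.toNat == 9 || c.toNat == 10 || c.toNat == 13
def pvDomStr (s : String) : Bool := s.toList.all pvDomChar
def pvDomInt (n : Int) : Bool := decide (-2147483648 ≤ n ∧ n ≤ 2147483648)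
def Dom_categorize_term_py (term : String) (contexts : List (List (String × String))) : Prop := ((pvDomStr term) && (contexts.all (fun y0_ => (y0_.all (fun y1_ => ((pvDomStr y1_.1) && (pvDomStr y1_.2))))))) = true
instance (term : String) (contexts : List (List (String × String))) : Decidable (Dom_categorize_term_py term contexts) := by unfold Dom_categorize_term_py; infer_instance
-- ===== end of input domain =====

-- B makes one pass collecting presence flags instead of A's three any(...) scans; same results, same priority order (objective: alternative decomposition).
-- ===== PORT A =====
def categorize_term_py (term : String) (contexts : List (List (String × String))) : String :=
  if contexts.any (fun ctx => PySem.Str.isIn "gita" (PySem.Str.lower ((PySem.Dict.mk ctx).getD "source" ""))) then "bhagavad_gita"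
  else if contexts.any (fun ctx => PySem.Str.isIn "upanishad" (PySem.Str.lower ((PySem.Dict.mk ctx).getD "source" ""))) then "upanishad"
  else if contexts.any (fun ctx => PySem.Str.isIn "yoga" (PySem.Str.lower ((PySem.Dict.mk ctx).getD "source" ""))) then "yoga_sutra"
  else "scripture"

-- ===== PORT B =====
-- one fold over contexts computing src once per ctx and accumulating three flags
def categorize_term_py_alt (term : String) (contexts : List (List (String × String))) : String :=
  let flags := contexts.foldl (fun (st : Bool × Bool × Bool) ctx =>
    let src := PySem.Str.lower ((PySem.Dict.mk ctx).getD "source" "")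
    ((if PySem.Str.isIn "gita" src then true else st.1),
     (if PySem.Str.isIn "upanishad" src then true else st.2.1),
     (if PySem.Str.isIn "yoga" src then true else st.2.2))) (false, false, false)
  if flags.1 then "bhagavad_gita"
  else if flags.2.1 then "upanishad"
  else if flags.2.2 then "yoga_sutra"
  else "scripture"

-- ===== PRECONDITION & SPEC =====
def Spec_categorize_term_py (term : String) (contexts : List (List (String × String))) (out : String) : Prop := out = categorize_term_py_alt term contexts
instance (term : String) (contexts : List (List (String × String))) (out : String) : Decidable (Spec_categorize_term_py term contexts out) := by unfold Spec_categorize_term_py; infer_instance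

-- ===== CLAIM (what is proved, stated in full; the proofs are below) =====
def Claim_equal_categorize_term_py : Prop := ∀ (term : String) (contexts : List (List (String × String))), Dom_categorize_term_py term contexts → Spec_categorize_term_py term contexts (categorize_term_py term contexts)

-- ===== LEMMAS AND PROOFS =====

-- ===== VERDICT (by name: the statement is the Claim_ definition above) =====
lemma flags_foldl (contexts : List (List (String × String))) (g u y : Bool) :
    contexts.foldl (fun (st : Bool × Bool × Bool) ctx =>
      let src := PySem.Str.lower ((PySem.Dict.mk ctx).getD "source" "")
      ((if PySem.Str.isIn "gita" src then true else st.1),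
       (if PySem.Str.isIn "upanishad" src then true else st.2.1),
       (if PySem.Str.isIn "yoga" src then true else st.2.2))) (g, u, y)
    = ((g || contexts.any (fun ctx => PySem.Str.isIn "gita" (PySem.Str.lower ((PySem.Dict.mk ctx).getD "source" "")))),
       (u || contexts.any (fun ctx => PySem.Str.isIn "upanishad" (PySem.Str.lower ((PySem.Dict.mk ctx).getD "source" "")))),
       (y || contexts.any (fun ctx => PySem.Str.isIn "yoga" (PySem.Str.lower ((PySem.Dict.mk ctx).getD "source" ""))))) := by
  induction contexts generalizing g u y with
  | nil => simp
  | cons c cs ih =>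
    simp only [List.foldl_cons, List.any_cons, ih]
    split_ifs <;> simp_all

theorem categorize_term_py_spec : Claim_equal_categorize_term_py := by
  intro term contexts _
  unfold Spec_categorize_term_py categorize_term_py categorize_term_py_alt
  rw [flags_foldl]
  simp
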